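-- pv_equiv track=rewrite | github.com/gongnim/kpop-fandom-viewer | kpi/performance_analytics.py | _determine_issue_timeline
-- ===== SOURCE A (Python) =====
-- from typing import Dict, List, Any, Optional, Union, Tuple
--
-- def _determine_issue_timeline(issues: List[Dict[str, Any]]) -> str:
--     """Determine when issues started based on analysis."""
--     timelines = [issue['timeline'] for issue in issues]
--
--     # Return the most recent/specific timeline
--     if 'Recent 3 data points' in timelines:
--         return 'Past 3-5 days'
--     elif 'Recent 5 data points' in timelines:
--         return 'Past 1-2 weeks'
--     elif 'Recent data points' in timelines:
--         return 'Recent period'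
--     else:
--         return 'Timeline unclear'
-- ===== SOURCE B (Python) =====
-- _RANK = {'Recent 3 data points': 0, 'Recent 5 data points': 1, 'Recent data points': 2}
-- _OUT = {0: 'Past 3-5 days', 1: 'Past 1-2 weeks', 2: 'Recent period', 3: 'Timeline unclear'}
--
-- def _determine_issue_timeline(issues):
--     """Single reducing pass: keep the minimum priority rank seen, then map it to text."""
--     best = 3
--     for issue in issues:
--         best = min(best, _RANK.get(issue['timeline'], 3))
--     return _OUT[best]
-- ===== Notes on version B (the rewrite author's own statement) =====
-- stated objective: alternative
-- what changed: Replaces the materialized timeline list plus three ordered membership scans with a single fold that keeps the minimum rank from a priority table, mapped to the output string at the end.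
import Mathlib
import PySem

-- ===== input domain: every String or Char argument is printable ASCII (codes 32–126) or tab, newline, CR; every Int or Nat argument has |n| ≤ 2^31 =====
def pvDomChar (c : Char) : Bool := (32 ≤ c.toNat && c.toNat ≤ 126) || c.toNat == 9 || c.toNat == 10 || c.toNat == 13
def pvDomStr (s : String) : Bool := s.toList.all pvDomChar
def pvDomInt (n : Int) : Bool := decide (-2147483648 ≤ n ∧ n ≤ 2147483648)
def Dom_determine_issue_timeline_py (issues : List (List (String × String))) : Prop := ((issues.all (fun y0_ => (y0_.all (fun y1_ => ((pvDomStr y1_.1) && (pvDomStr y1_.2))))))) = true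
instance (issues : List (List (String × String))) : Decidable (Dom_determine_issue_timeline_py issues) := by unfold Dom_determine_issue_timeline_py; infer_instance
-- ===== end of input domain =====

-- B replaces list materialization + three ordered membership scans by one min-rank fold over a priority table (alternative decomposition, same cost).


-- ===== PORT A =====
-- issue['timeline']: first-match association lookup; Python raises KeyError when the key
-- is missing — exactly those inputs are excluded by Pre_ below (the `.getD ""` default is
-- never reached inside Pre_).
def pvTimeline (issue : List (String × String)) : Option String :=
  (issue.find? (fun p => p.1 == "timeline")).map (·.2)

def determine_issue_timeline_py (issues : List (List (String × String))) : String :=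
  let timelines := issues.map pvTimeline
  if timelines.contains (some "Recent 3 data points") then "Past 3-5 days"
  else if timelines.contains (some "Recent 5 data points") then "Past 1-2 weeks"
  else if timelines.contains (some "Recent data points") then "Recent period"
  else "Timeline unclear"

-- ===== PORT B =====
-- _RANK.get(t, 3)
def pvRank (t : String) : Int :=
  if t = "Recent 3 data points" then 0
  else if t = "Recent 5 data points" then 1
  else if t = "Recent data points" then 2
  else 3

def determine_issue_timeline_py_alt (issues : List (List (String × String))) : String :=
  let best := issues.foldl (fun b issue => min b (pvRank ((pvTimeline issue).getD ""))) 3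
  if best = 0 then "Past 3-5 days"
  else if best = 1 then "Past 1-2 weeks"
  else if best = 2 then "Recent period"
  else "Timeline unclear"

-- ===== PRECONDITION & SPEC =====
-- Pre_ excludes exactly the inputs where Python A raises KeyError: an issue without a 'timeline' key.
def Pre_determine_issue_timeline_py (issues : List (List (String × String))) : Prop :=
  (issues.all (fun issue => issue.any (fun p => p.1 == "timeline"))) = true
instance (issues : List (List (String × String))) : Decidable (Pre_determine_issue_timeline_py issues) := by
  unfold Pre_determine_issue_timeline_py; infer_instance

def pvWitness_determine_issue_timeline_py : (List (List (String × String))) :=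
  [[("timeline", "Recent 3 data points")], [("timeline", "stable")]]

def Spec_determine_issue_timeline_py (issues : List (List (String × String))) (out : String) : Prop := out = determine_issue_timeline_py_alt issues
instance (issues : List (List (String × String))) (out : String) : Decidable (Spec_determine_issue_timeline_py issues out) := by unfold Spec_determine_issue_timeline_py; infer_instance

-- ===== CLAIM (what is proved, stated in full; the proofs are below) =====
def Claim_equal_determine_issue_timeline_py : Prop := ∀ (issues : List (List (String × String))), Dom_determine_issue_timeline_py issues → Pre_determine_issue_timeline_py issues → Spec_determine_issue_timeline_py issues (determine_issue_timeline_py issues)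

-- ===== LEMMAS AND PROOFS =====

def pvRank' (issue : List (String × String)) : Int := pvRank ((pvTimeline issue).getD "")

def pvM (l : List (List (String × String))) : Int :=
  l.foldl (fun b issue => min b (pvRank' issue)) 3

lemma pvRank_cases (t : String) : pvRank t = 0 ∨ pvRank t = 1 ∨ pvRank t = 2 ∨ pvRank t = 3 := by
  unfold pvRank; split_ifs <;> simp

lemma pvRank'_cases (i : List (String × String)) :
    pvRank' i = 0 ∨ pvRank' i = 1 ∨ pvRank' i = 2 ∨ pvRank' i = 3 := pvRank_cases _

lemma pvRank'_bounds (i : List (String × String)) : 0 ≤ pvRank' i ∧ pvRank' i ≤ 3 := by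
  rcases pvRank'_cases i with h | h | h | h <;> rw [h] <;> exact ⟨by norm_num, by norm_num⟩

lemma pvM_shift (l : List (List (String × String))) (b : Int) (hb : b ≤ 3) :
    l.foldl (fun b issue => min b (pvRank' issue)) b = min b (pvM l) := by
  induction l generalizing b with
  | nil => simp only [List.foldl_nil, pvM]; omega
  | cons i l ih =>
    have hr := pvRank'_bounds i
    have h1 : min b (pvRank' i) ≤ 3 := by omega
    have h2 : min 3 (pvRank' i) ≤ 3 := by omega
    simp only [List.foldl_cons, pvM] at *
    rw [ih _ h1, ih _ h2]
    have h3 : min 3 (pvRank' i) = pvRank' i := by omega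
    rw [h3, min_assoc]

lemma pvM_cons (i : List (String × String)) (l : List (List (String × String))) :
    pvM (i :: l) = min (pvRank' i) (pvM l) := by
  have hr := pvRank'_bounds i
  have h3 : min 3 (pvRank' i) = pvRank' i := by omega
  rw [pvM, List.foldl_cons, pvM_shift l _ (by omega), h3]

lemma pvRank'_eq_iff (i : List (String × String)) (k : Int) (s : String)
    (hk : (k = 0 ∧ s = "Recent 3 data points") ∨ (k = 1 ∧ s = "Recent 5 data points")
        ∨ (k = 2 ∧ s = "Recent data points")) :
    (pvRank' i = k) ↔ pvTimeline i = some s := by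
  unfold pvRank'
  cases h : pvTimeline i with
  | none =>
    simp only [Option.getD_none]
    rcases hk with ⟨hk, hs⟩ | ⟨hk, hs⟩ | ⟨hk, hs⟩ <;> subst hk <;> simp [pvRank]
  | some t =>
    simp only [Option.getD_some, Option.some.injEq]
    unfold pvRank
    rcases hk with ⟨hk, hs⟩ | ⟨hk, hs⟩ | ⟨hk, hs⟩ <;> subst hk <;> subst hs <;>
      split_ifs with h1 h2 h3 <;> simp_all

lemma pvM_facts (l : List (List (String × String))) :
    (0 ≤ pvM l ∧ pvM l ≤ 3)
    ∧ (pvM l = 0 ↔ ∃ i ∈ l, pvRank' i = 0)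
    ∧ (pvM l ≤ 1 ↔ ∃ i ∈ l, pvRank' i ≤ 1)
    ∧ (pvM l ≤ 2 ↔ ∃ i ∈ l, pvRank' i ≤ 2) := by
  induction l with
  | nil =>
    refine ⟨⟨?_, ?_⟩, ?_, ?_, ?_⟩ <;> simp [pvM]
  | cons i l ih =>
    obtain ⟨⟨hlo, hhi⟩, h0, h1, h2⟩ := ih
    have hr := pvRank'_bounds i
    rw [pvM_cons]
    refine ⟨⟨by omega, by omega⟩, ?_, ?_, ?_⟩ <;>
      simp only [List.mem_cons, exists_eq_or_imp]
    · rw [← h0]; omega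
    · rw [← h1]; omega
    · rw [← h2]; omega

lemma contains_iff_exists (issues : List (List (String × String))) (s : String) :
    ((issues.map pvTimeline).contains (some s) = true) ↔ ∃ i ∈ issues, pvTimeline i = some s := by
  simp [eq_comm]

lemma pvRankLeOne (i : List (String × String)) :
    pvRank' i ≤ 1 ↔ (pvTimeline i = some "Recent 3 data points" ∨ pvTimeline i = some "Recent 5 data points") := by
  rw [← pvRank'_eq_iff i 0 _ (by simp), ← pvRank'_eq_iff i 1 _ (by simp)]
  have := pvRank'_bounds i; omega

lemma pvRankLeTwo (i : List (String × String)) :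
    pvRank' i ≤ 2 ↔ (pvTimeline i = some "Recent 3 data points" ∨ pvTimeline i = some "Recent 5 data points" ∨ pvTimeline i = some "Recent data points") := by
  rw [← pvRank'_eq_iff i 0 _ (by simp), ← pvRank'_eq_iff i 1 _ (by simp), ← pvRank'_eq_iff i 2 _ (by simp)]
  have := pvRank'_bounds i; omega

-- ===== VERDICT (by name: the statement is the Claim_ definition above) =====
theorem determine_issue_timeline_py_spec : Claim_equal_determine_issue_timeline_py := by
  intro issues _ _
  unfold Spec_determine_issue_timeline_py determine_issue_timeline_py determine_issue_timeline_py_alt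
  obtain ⟨⟨hlo, hhi⟩, h0, h1, h2⟩ := pvM_facts issues
  have hM : issues.foldl (fun b issue => min b (pvRank ((pvTimeline issue).getD ""))) 3 = pvM issues := rfl
  have E0 : pvM issues = 0 ↔ ∃ i ∈ issues, pvTimeline i = some "Recent 3 data points" :=
    h0.trans (exists_congr fun i => and_congr_right fun _ => pvRank'_eq_iff i 0 _ (by simp))
  have E1 : pvM issues ≤ 1 ↔ ((∃ i ∈ issues, pvTimeline i = some "Recent 3 data points")
      ∨ (∃ i ∈ issues, pvTimeline i = some "Recent 5 data points")) :=
    h1.trans ((exists_congr fun i => and_congr_right fun _ => pvRankLeOne i).trans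
      (by simp only [and_or_left, exists_or]))
  have E2 : pvM issues ≤ 2 ↔ ((∃ i ∈ issues, pvTimeline i = some "Recent 3 data points")
      ∨ (∃ i ∈ issues, pvTimeline i = some "Recent 5 data points")
      ∨ (∃ i ∈ issues, pvTimeline i = some "Recent data points")) :=
    h2.trans ((exists_congr fun i => and_congr_right fun _ => pvRankLeTwo i).trans
      (by simp only [and_or_left, exists_or]))
  simp only [hM, contains_iff_exists]
  by_cases c0 : ∃ i ∈ issues, pvTimeline i = some "Recent 3 data points"
  · have hv : pvM issues = 0 := E0.mpr c0
    rw [if_pos c0, hv]; norm_num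
  by_cases c1 : ∃ i ∈ issues, pvTimeline i = some "Recent 5 data points"
  · have hv : pvM issues = 1 := by
      have := E1.mpr (Or.inr c1)
      have := E0.not.mpr c0
      omega
    rw [if_neg c0, if_pos c1, hv]; norm_num
  by_cases c2 : ∃ i ∈ issues, pvTimeline i = some "Recent data points"
  · have hv : pvM issues = 2 := by
      have := E2.mpr (Or.inr (Or.inr c2))
      have := E1.not.mpr (fun h => h.elim c0 c1)
      omega
    rw [if_neg c0, if_neg c1, if_pos c2, hv]; norm_num
  · have hv : pvM issues = 3 := by
      have := E2.not.mpr (fun h => h.elim c0 (fun h' => h'.elim c1 c2))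
      omega
    rw [if_neg c0, if_neg c1, if_neg c2, hv]; norm_num
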